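-- pv_equiv track=rewrite | github.com/noorulameenkm/DataStructuresAlgorithms | BinarySearchTree/maximumHeightBST.py | maximum_height_bst
-- ===== SOURCE A (Python) =====
-- def maximum_height_bst(arr):
--     maxHeight = 0
--
--     for i in range(len(arr)):
--         root = arr[i]
--
--         leftCount = 0
--         rightCount = 0
--
--         for j in range(i):
--             if arr[j] < root:
--                 leftCount += 1
--
--         for j in range(i + 1, len(arr)):
--             if arr[j] > root:
--                 rightCount += 1
--
--         maxHeight = max(maxHeight, max(leftCount, rightCount))
--
--     return maxHeight
-- ===== SOURCE B (Python) =====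
-- def maximum_height_bst(arr):
--     # Sorted-prefix counting with hand-written binary search instead of
--     # quadratic rescans: one forward pass counts smaller-before, one
--     # backward pass counts greater-after.
--     def bisect_left(a, x):
--         lo, hi = 0, len(a)
--         while lo < hi:
--             mid = (lo + hi) // 2
--             if a[mid] < x:
--                 lo = mid + 1
--             else:
--                 hi = mid
--         return lo
--
--     def bisect_right(a, x):
--         lo, hi = 0, len(a)
--         while lo < hi:
--             mid = (lo + hi) // 2
--             if x < a[mid]:
--                 hi = mid
--             else:
--                 lo = mid + 1
--         return lo
--
--     best = 0
--     seen = []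
--     for x in arr:
--         c = bisect_left(seen, x)
--         if c > best:
--             best = c
--         seen.insert(c, x)
--     after = []
--     for x in reversed(arr):
--         c = len(after) - bisect_right(after, x)
--         if c > best:
--             best = c
--         after.insert(len(after) - c, x)
--     return best
-- ===== Notes on version B (the rewrite author's own statement) =====
-- stated objective: faster
-- what changed: Replaces the per-index quadratic rescans with two sorted-running-list passes: a forward pass keeps the prefix sorted and binary-searches each element's smaller-before count, a backward pass keeps the suffix sorted and binary-searches the greater-after count.
import Mathlib
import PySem

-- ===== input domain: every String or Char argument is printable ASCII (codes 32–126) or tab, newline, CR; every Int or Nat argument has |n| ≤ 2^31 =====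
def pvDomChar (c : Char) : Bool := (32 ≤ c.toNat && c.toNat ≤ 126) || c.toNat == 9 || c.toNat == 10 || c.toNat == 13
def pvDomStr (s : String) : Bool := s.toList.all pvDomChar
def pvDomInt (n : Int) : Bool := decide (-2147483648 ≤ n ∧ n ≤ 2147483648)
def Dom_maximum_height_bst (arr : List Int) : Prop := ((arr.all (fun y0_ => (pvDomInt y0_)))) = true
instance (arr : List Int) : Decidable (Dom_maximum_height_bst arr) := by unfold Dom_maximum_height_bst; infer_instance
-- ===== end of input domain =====

-- B replaces A's per-index quadratic rescans by two sorted-running-list passes with binary search (measured faster in a timing run).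

-- ===== PORT A =====
def maximum_height_bst (arr : List Int) : Int :=
  (PySem.List.pyRange 0 (arr.length : Int) 1).foldl (fun maxHeight i =>
    let root := PySem.List.pyGetD arr i 0
    let leftCount := (PySem.List.pyRange 0 i 1).foldl
      (fun c j => if PySem.List.pyGetD arr j 0 < root then c + 1 else c) (0 : Int)
    let rightCount := (PySem.List.pyRange (i + 1) (arr.length : Int) 1).foldl
      (fun c j => if PySem.List.pyGetD arr j 0 > root then c + 1 else c) (0 : Int)
    max maxHeight (max leftCount rightCount)) 0

-- ===== PORT B =====
-- hand-written binary search of Source B (bisect_left); exact: lo/hi/mid stay in [0, len]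
def pvBisectLeft (a : List Int) (x : Int) (lo hi : Nat) : Nat :=
  if _h : lo < hi then
    let mid := (lo + hi) / 2
    if a.getD mid 0 < x then pvBisectLeft a x (mid + 1) hi
    else pvBisectLeft a x lo mid
  else lo
termination_by hi - lo
decreasing_by all_goals omega

-- hand-written binary search of Source B (bisect_right); exact: lo/hi/mid stay in [0, len]
def pvBisectRight (a : List Int) (x : Int) (lo hi : Nat) : Nat :=
  if _h : lo < hi then
    let mid := (lo + hi) / 2
    if x < a.getD mid 0 then pvBisectRight a x lo mid
    else pvBisectRight a x (mid + 1) hi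
  else lo
termination_by hi - lo
decreasing_by all_goals omega

def maximum_height_bst_alt (arr : List Int) : Int :=
  let fwd := arr.foldl (fun (st : Int × List Int) x =>
      let c := pvBisectLeft st.2 x 0 st.2.length
      ((if (c : Int) > st.1 then (c : Int) else st.1), st.2.insertIdx c x))
    ((0 : Int), ([] : List Int))
  let bwd := arr.reverse.foldl (fun (st : Int × List Int) x =>
      let c := st.2.length - pvBisectRight st.2 x 0 st.2.length
      ((if (c : Int) > st.1 then (c : Int) else st.1), st.2.insertIdx (st.2.length - c) x))
    (fwd.1, ([] : List Int))
  bwd.1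

-- ===== PRECONDITION & SPEC =====
def Spec_maximum_height_bst (arr : List Int) (out : Int) : Prop := out = maximum_height_bst_alt arr
instance (arr : List Int) (out : Int) : Decidable (Spec_maximum_height_bst arr out) := by unfold Spec_maximum_height_bst; infer_instance

-- ===== CLAIM (what is proved, stated in full; the proofs are below) =====
def Claim_equal_maximum_height_bst : Prop := ∀ (arr : List Int), Dom_maximum_height_bst arr → Spec_maximum_height_bst arr (maximum_height_bst arr)

-- ===== LEMMAS AND PROOFS =====

-- the smaller-before / greater-after counts both programs compute
def pvL (arr : List Int) (k : Nat) : Int :=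
  ((arr.take k).countP (fun y => decide (y < arr.getD k 0)) : Nat)
def pvR (arr : List Int) (k : Nat) : Int :=
  ((arr.drop (k + 1)).countP (fun y => decide (arr.getD k 0 < y)) : Nat)

theorem pv_sorted_le (s : List Int) (hs : List.Pairwise (· ≤ ·) s) {j k : Nat}
    (hj : j < s.length) (hk : k < s.length) (hjk : j ≤ k) : s[j] ≤ s[k] := by
  rcases Nat.lt_or_ge j k with h | h
  · exact List.pairwise_iff_getElem.1 hs j k hj hk h
  · have : j = k := Nat.le_antisymm hjk h
    subst this; exact le_refl _

-- boundary characterisation of countP when the predicate is downward closed along the list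
theorem pv_countP_boundary (s : List Int) (p : Int → Bool)
    (hdc : ∀ j k (_ : j < s.length) (hk : k < s.length), j ≤ k → p s[k] = true → p s[j] = true) :
    ∀ k (hk : k < s.length), (p s[k] = true ↔ k < s.countP p) := by
  intro k hk
  have hsplit1 : s.countP p = (s.take (k+1)).countP p + (s.drop (k+1)).countP p := by
    conv_lhs => rw [← List.take_append_drop (k+1) s]
    rw [List.countP_append]
  have hsplit0 : s.countP p = (s.take k).countP p + (s.drop k).countP p := by
    conv_lhs => rw [← List.take_append_drop k s]
    rw [List.countP_append]
  constructor
  · intro hp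
    have htake : (s.take (k+1)).countP p = (s.take (k+1)).length := by
      rw [List.countP_eq_length]
      intro a ha
      obtain ⟨i, hi, rfl⟩ := List.mem_iff_getElem.1 ha
      have hi' : i < s.length := by simp [List.length_take] at hi; omega
      have hik : i ≤ k := by simp [List.length_take] at hi; omega
      rw [List.getElem_take]
      exact hdc i k hi' hk hik hp
    have hlen : (s.take (k+1)).length = k + 1 := by rw [List.length_take]; omega
    omega
  · intro hlt
    by_contra hnp
    have hdrop : (s.drop k).countP p = 0 := by
      rw [List.countP_eq_zero]
      intro a ha
      obtain ⟨i, hi, rfl⟩ := List.mem_iff_getElem.1 ha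
      have hi' : k + i < s.length := by simp at hi; omega
      rw [List.getElem_drop]
      intro hpa
      exact hnp (hdc k (k + i) hk hi' (by omega) hpa)
    have h1 : (s.take k).countP p ≤ (s.take k).length := List.countP_le_length
    have h2 : (s.take k).length = k := by rw [List.length_take]; omega
    omega

theorem pvBisectLeft_boundary (s : List Int) (x : Int) (m : Nat)
    (hb : ∀ k (hk : k < s.length), (s[k] < x ↔ k < m))
    (lo hi : Nat) (hlo : lo ≤ m) (hhi : m ≤ hi) (hlen : hi ≤ s.length) :
    pvBisectLeft s x lo hi = m := by
  rw [pvBisectLeft]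
  by_cases h : lo < hi
  · rw [dif_pos h]
    have hmid : (lo + hi) / 2 < hi := by omega
    have hmidlen : (lo + hi) / 2 < s.length := by omega
    have hget : s.getD ((lo + hi) / 2) 0 = s[(lo + hi) / 2] := List.getD_eq_getElem s 0 hmidlen
    dsimp only
    rw [hget]
    by_cases hc : s[(lo + hi) / 2] < x
    · rw [if_pos hc]
      have := (hb _ hmidlen).1 hc
      exact pvBisectLeft_boundary s x m hb _ hi (by omega) hhi hlen
    · rw [if_neg hc]
      have := mt (hb _ hmidlen).2 hc
      exact pvBisectLeft_boundary s x m hb lo _ hlo (by omega) (by omega)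
  · rw [dif_neg h]
    omega
termination_by hi - lo
decreasing_by all_goals omega

theorem pvBisectRight_boundary (s : List Int) (x : Int) (m : Nat)
    (hb : ∀ k (hk : k < s.length), (s[k] ≤ x ↔ k < m))
    (lo hi : Nat) (hlo : lo ≤ m) (hhi : m ≤ hi) (hlen : hi ≤ s.length) :
    pvBisectRight s x lo hi = m := by
  rw [pvBisectRight]
  by_cases h : lo < hi
  · rw [dif_pos h]
    have hmid : (lo + hi) / 2 < hi := by omega
    have hmidlen : (lo + hi) / 2 < s.length := by omega
    have hget : s.getD ((lo + hi) / 2) 0 = s[(lo + hi) / 2] := List.getD_eq_getElem s 0 hmidlen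
    dsimp only
    rw [hget]
    by_cases hc : x < s[(lo + hi) / 2]
    · rw [if_pos hc]
      have := mt (hb _ hmidlen).2 (not_le.2 hc)
      exact pvBisectRight_boundary s x m hb lo _ hlo (by omega) (by omega)
    · rw [if_neg hc]
      have := (hb _ hmidlen).1 (not_lt.1 hc)
      exact pvBisectRight_boundary s x m hb _ hi (by omega) hhi hlen
  · rw [dif_neg h]
    omega
termination_by hi - lo
decreasing_by all_goals omega

theorem pvBisectLeft_count (s : List Int) (x : Int) (hs : List.Pairwise (· ≤ ·) s) :
    pvBisectLeft s x 0 s.length = s.countP (fun y => decide (y < x)) := by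
  have hdc : ∀ j k (_ : j < s.length) (hk : k < s.length), j ≤ k →
      (fun y => decide (y < x)) s[k] = true → (fun y => decide (y < x)) s[j] = true := by
    intro j k hj hk hjk hp
    simp only [decide_eq_true_eq] at *
    exact lt_of_le_of_lt (pv_sorted_le s hs hj hk hjk) hp
  refine pvBisectLeft_boundary s x _ ?_ 0 s.length (Nat.zero_le _) List.countP_le_length (le_refl _)
  intro k hk
  have := pv_countP_boundary s (fun y => decide (y < x)) hdc k hk
  simpa using this

theorem pvBisectRight_count (s : List Int) (x : Int) (hs : List.Pairwise (· ≤ ·) s) :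
    pvBisectRight s x 0 s.length = s.countP (fun y => decide (y ≤ x)) := by
  have hdc : ∀ j k (_ : j < s.length) (hk : k < s.length), j ≤ k →
      (fun y => decide (y ≤ x)) s[k] = true → (fun y => decide (y ≤ x)) s[j] = true := by
    intro j k hj hk hjk hp
    simp only [decide_eq_true_eq] at *
    exact le_trans (pv_sorted_le s hs hj hk hjk) hp
  refine pvBisectRight_boundary s x _ ?_ 0 s.length (Nat.zero_le _) List.countP_le_length (le_refl _)
  intro k hk
  have := pv_countP_boundary s (fun y => decide (y ≤ x)) hdc k hk
  simpa using this

theorem pv_insertIdx_eq : ∀ (s : List Int) (m : Nat) (x : Int), m ≤ s.length →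
    s.insertIdx m x = s.take m ++ x :: s.drop m
  | s, 0, x, _ => by simp
  | a :: t, m + 1, x, h => by
    simp only [List.insertIdx_succ_cons, List.take_succ_cons, List.drop_succ_cons, List.cons_append]
    rw [pv_insertIdx_eq t m x (by simpa using h)]

theorem pv_pairwise_insertIdx (s : List Int) (x : Int) (m : Nat) (hm : m ≤ s.length)
    (h1 : ∀ k (hk : k < s.length), k < m → s[k] ≤ x)
    (h2 : ∀ k (hk : k < s.length), m ≤ k → x ≤ s[k])
    (hs : List.Pairwise (· ≤ ·) s) : List.Pairwise (· ≤ ·) (s.insertIdx m x) := by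
  rw [pv_insertIdx_eq s m x hm, List.pairwise_append]
  refine ⟨List.Pairwise.sublist (List.take_sublist m s) hs, ?_, ?_⟩
  · rw [List.pairwise_cons]
    refine ⟨?_, List.Pairwise.sublist (List.drop_sublist m s) hs⟩
    intro b hb
    obtain ⟨i, hi, rfl⟩ := List.mem_iff_getElem.1 hb
    rw [List.getElem_drop]
    exact h2 (m + i) (by simp at hi; omega) (by omega)
  · intro a ha b hb
    obtain ⟨i, hi, rfl⟩ := List.mem_iff_getElem.1 ha
    have hi' : i < s.length := by simp [List.length_take] at hi; omega
    have him : i < m := by simp [List.length_take] at hi; omega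
    rw [List.getElem_take]
    have hax : s[i] ≤ x := h1 i hi' him
    rcases List.mem_cons.1 hb with rfl | hb'
    · exact hax
    · obtain ⟨j, hj, rfl⟩ := List.mem_iff_getElem.1 hb'
      rw [List.getElem_drop]
      exact le_trans hax (h2 (m + j) (by simp at hj; omega) (by omega))

theorem pv_if_max (b c : Int) : (if c > b then c else b) = max b c := by
  by_cases h : b < c
  · rw [if_pos h, max_eq_right h.le]
  · rw [if_neg h, max_eq_left (not_lt.1 h)]

-- the per-step count sequences of B's two passes
def lcountsAux (pre : List Int) : List Int → List Int
  | [] => []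
  | x :: r => ((pre.countP (fun y => decide (y < x)) : Nat) : Int) :: lcountsAux (pre ++ [x]) r

def rcountsAux (pre : List Int) : List Int → List Int
  | [] => []
  | x :: r => ((pre.countP (fun y => decide (x < y)) : Nat) : Int) :: rcountsAux (pre ++ [x]) r

theorem lcountsAux_eq : ∀ (xs pre : List Int),
    lcountsAux pre xs = (List.range xs.length).map
      (fun k => (((pre ++ xs.take k).countP (fun y => decide (y < xs.getD k 0)) : Nat) : Int))
  | [], pre => by simp [lcountsAux]
  | x :: r, pre => by
    simp only [lcountsAux, List.length_cons, List.range_succ_eq_map, List.map_cons, List.map_map]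
    congr 1
    · simp
    · rw [lcountsAux_eq r (pre ++ [x])]
      apply List.map_congr_left
      intro k _
      simp [Function.comp, Nat.succ_eq_add_one, List.take_succ_cons,
        List.append_assoc]

theorem rcountsAux_eq : ∀ (xs pre : List Int),
    rcountsAux pre xs = (List.range xs.length).map
      (fun k => (((pre ++ xs.take k).countP (fun y => decide (xs.getD k 0 < y)) : Nat) : Int))
  | [], pre => by simp [rcountsAux]
  | x :: r, pre => by
    simp only [rcountsAux, List.length_cons, List.range_succ_eq_map, List.map_cons, List.map_map]
    congr 1
    · simp
    · rw [rcountsAux_eq r (pre ++ [x])]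
      apply List.map_congr_left
      intro k _
      simp [Function.comp, Nat.succ_eq_add_one, List.take_succ_cons,
        List.append_assoc]

-- B's forward pass: running max over the smaller-before counts of the processed prefix
theorem pv_fwd : ∀ (xs : List Int) (b : Int) (s pre : List Int),
    List.Pairwise (· ≤ ·) s → s.Perm pre →
    (xs.foldl (fun (st : Int × List Int) x =>
      let c := pvBisectLeft st.2 x 0 st.2.length
      ((if (c : Int) > st.1 then (c : Int) else st.1), st.2.insertIdx c x)) (b, s)).1
      = (lcountsAux pre xs).foldl max b
  | [], b, s, pre, _, _ => by simp [lcountsAux]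
  | x :: r, b, s, pre, hs, hp => by
    simp only [List.foldl_cons, lcountsAux]
    have hm := pvBisectLeft_count s x hs
    have hmle : s.countP (fun y => decide (y < x)) ≤ s.length := List.countP_le_length
    have hdc : ∀ j k (_ : j < s.length) (hk : k < s.length), j ≤ k →
        (fun y => decide (y < x)) s[k] = true → (fun y => decide (y < x)) s[j] = true := by
      intro j k hj hk hjk hpk
      simp only [decide_eq_true_eq] at *
      exact lt_of_le_of_lt (pv_sorted_le s hs hj hk hjk) hpk
    have hbd := pv_countP_boundary s (fun y => decide (y < x)) hdc
    have hsorted' : List.Pairwise (· ≤ ·)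
        (s.insertIdx (s.countP (fun y => decide (y < x))) x) := by
      refine pv_pairwise_insertIdx s x _ hmle ?_ ?_ hs
      · intro k hk hklt
        have := (hbd k hk).2 hklt
        simp only [decide_eq_true_eq] at this
        exact this.le
      · intro k hk hkge
        have := mt (hbd k hk).1 (by omega)
        simp only [decide_eq_true_eq] at this
        exact (not_lt.1 this)
    have hperm' : (s.insertIdx (s.countP (fun y => decide (y < x))) x).Perm (pre ++ [x]) :=
      (List.perm_insertIdx x s hmle).trans ((hp.cons x).trans (List.perm_append_singleton x pre).symm)
    rw [hm]
    rw [pv_fwd r _ _ (pre ++ [x]) hsorted' hperm']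
    rw [List.Perm.countP_eq (fun y => decide (y < x)) hp, pv_if_max]
  termination_by xs => xs.length

-- B's backward pass: running max over the greater-after counts of the processed prefix
theorem pv_bwd : ∀ (xs : List Int) (b : Int) (s pre : List Int),
    List.Pairwise (· ≤ ·) s → s.Perm pre →
    (xs.foldl (fun (st : Int × List Int) x =>
      let c := st.2.length - pvBisectRight st.2 x 0 st.2.length
      ((if (c : Int) > st.1 then (c : Int) else st.1), st.2.insertIdx (st.2.length - c) x)) (b, s)).1
      = (rcountsAux pre xs).foldl max b
  | [], b, s, pre, _, _ => by simp [rcountsAux]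
  | x :: r, b, s, pre, hs, hp => by
    simp only [List.foldl_cons, rcountsAux]
    have hm := pvBisectRight_count s x hs
    have hmle : s.countP (fun y => decide (y ≤ x)) ≤ s.length := List.countP_le_length
    have hsplit := List.length_eq_countP_add_countP (fun y => decide (y ≤ x)) (l := s)
    have hcongr : s.countP (fun a => decide (¬ (decide (a ≤ x)) = true)) =
        s.countP (fun y => decide (x < y)) := by
      apply List.countP_congr
      intro a _
      simp [not_le]
    have hsub : s.length - s.countP (fun y => decide (y ≤ x)) =
        s.countP (fun y => decide (x < y)) := by omega
    have hdc : ∀ j k (_ : j < s.length) (hk : k < s.length), j ≤ k →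
        (fun y => decide (y ≤ x)) s[k] = true → (fun y => decide (y ≤ x)) s[j] = true := by
      intro j k hj hk hjk hpk
      simp only [decide_eq_true_eq] at *
      exact le_trans (pv_sorted_le s hs hj hk hjk) hpk
    have hbd := pv_countP_boundary s (fun y => decide (y ≤ x)) hdc
    have hsorted' : List.Pairwise (· ≤ ·)
        (s.insertIdx (s.countP (fun y => decide (y ≤ x))) x) := by
      refine pv_pairwise_insertIdx s x _ hmle ?_ ?_ hs
      · intro k hk hklt
        have := (hbd k hk).2 hklt
        simpa using this
      · intro k hk hkge
        have := mt (hbd k hk).1 (by omega)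
        simp only [decide_eq_true_eq] at this
        exact (not_le.1 this).le
    have hperm' : (s.insertIdx (s.countP (fun y => decide (y ≤ x))) x).Perm (pre ++ [x]) :=
      (List.perm_insertIdx x s hmle).trans ((hp.cons x).trans (List.perm_append_singleton x pre).symm)
    rw [hm, Nat.sub_sub_self hmle, hsub]
    rw [pv_bwd r _ _ (pre ++ [x]) hsorted' hperm']
    rw [List.Perm.countP_eq (fun y => decide (x < y)) hp, pv_if_max]
  termination_by xs => xs.length

theorem pv_foldl_max_max (l : List Int) : ∀ a b : Int,
    l.foldl max (max a b) = max a (l.foldl max b) := by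
  induction l with
  | nil => intro a b; rfl
  | cons c t ih =>
    intro a b
    simp only [List.foldl_cons]
    rw [max_assoc, ih]

theorem pv_foldl_max_pair (r : List Nat) (L R : Nat → Int) : ∀ (a b : Int),
    r.foldl (fun m i => max m (max (L i) (R i))) (max a b)
      = max (r.foldl (fun m i => max m (L i)) a) (r.foldl (fun m i => max m (R i)) b) := by
  induction r with
  | nil => intro a b; rfl
  | cons i t ih =>
    intro a b
    simp only [List.foldl_cons]
    rw [max_max_max_comm, ih]

theorem pv_foldl_max_reverse (l : List Int) : ∀ b : Int,
    l.reverse.foldl max b = l.foldl max b := by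
  induction l with
  | nil => intro b; rfl
  | cons c t ih =>
    intro b
    simp only [List.reverse_cons, List.foldl_append, List.foldl_cons, List.foldl_nil, ih,
      List.foldl_cons]
    rw [show max b c = max c b from max_comm b c, pv_foldl_max_max t c b, max_comm]

-- the backward pass over the reversed input produces the greater-after counts, reversed
theorem pv_rcounts_reverse (arr : List Int) :
    rcountsAux [] arr.reverse
      = ((List.range arr.length).map (fun k => pvR arr k)).reverse := by
  rw [rcountsAux_eq, ← List.map_reverse]
  apply List.ext_getElem
  · simp
  · intro i h1 h2
    have hi : i < arr.length := by simpa using h1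
    simp only [List.getElem_map, List.getElem_reverse, List.getElem_range, List.length_range,
      List.nil_append, pvR]
    congr 1
    have hgd : arr.reverse.getD i 0 = arr[arr.length - 1 - i] := by
      rw [List.getD_eq_getElem arr.reverse 0 (by simpa using hi)]
      exact List.getElem_reverse _
    have hgd2 : arr.getD (arr.length - 1 - i) 0 = arr[arr.length - 1 - i] :=
      List.getD_eq_getElem arr 0 (by omega)
    rw [hgd, hgd2, List.take_reverse, List.countP_reverse,
      show arr.length - i = (arr.length - 1 - i) + 1 from by omega]

theorem pvA_eq (arr : List Int) :
    maximum_height_bst arr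
      = (List.range arr.length).foldl (fun m k => max m (max (pvL arr k) (pvR arr k))) 0 := by
  unfold maximum_height_bst
  rw [PySem.List.pyRange_zero_nat, List.foldl_map]
  apply PySem.List.foldl_congr_mem
  intro acc k hk
  have hkn : k < arr.length := List.mem_range.1 hk
  dsimp only
  rw [PySem.List.pyGetD_natCast]
  have htk : (arr.take k).length = k := by rw [List.length_take]; omega
  have hL : (PySem.List.pyRange 0 (k : Int) 1).foldl
      (fun c j => if PySem.List.pyGetD arr j 0 < arr.getD k 0 then c + 1 else c) (0 : Int)
      = pvL arr k := by
    rw [PySem.List.foldl_congr_mem _ _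
      (fun c j => if PySem.List.pyGetD (arr.take k) j 0 < arr.getD k 0 then c + 1 else c) _ ?_]
    · rw [show ((k : Nat) : Int) = ((arr.take k).length : Int) from by rw [htk]]
      rw [PySem.List.foldl_pyRange_zero_pyGetD' (arr.take k) 0
        (fun c y => if y < arr.getD k 0 then c + 1 else c) 0]
      rw [PySem.List.foldl_ite_add_one (fun y => y < arr.getD k 0) (arr.take k) 0]
      simp [pvL]
    · intro c j hj
      rw [PySem.List.mem_pyRange_one] at hj
      show (if PySem.List.pyGetD arr j 0 < arr.getD k 0 then c + 1 else c)
          = (if PySem.List.pyGetD (arr.take k) j 0 < arr.getD k 0 then c + 1 else c)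
      rw [PySem.List.pyGetD_eq_getElem arr 0 hj.1 (by omega),
        PySem.List.pyGetD_eq_getElem (arr.take k) 0 hj.1 (by push_cast [htk]; omega),
        List.getElem_take]
  have hR : (PySem.List.pyRange ((k : Int) + 1) (arr.length : Int) 1).foldl
      (fun c j => if PySem.List.pyGetD arr j 0 > arr.getD k 0 then c + 1 else c) (0 : Int)
      = pvR arr k := by
    rw [PySem.List.foldl_pyRange_pyGetD' arr 0
      (fun c y => if y > arr.getD k 0 then c + 1 else c) 0 (a := (k : Int) + 1) (by positivity)]
    rw [show (((k : Int) + 1)).toNat = k + 1 from by omega]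
    rw [PySem.List.foldl_ite_add_one (fun y => y > arr.getD k 0) (arr.drop (k + 1)) 0]
    simp [pvR]
  rw [hL, hR]

theorem pvB_eq (arr : List Int) :
    maximum_height_bst_alt arr
      = max ((List.range arr.length).foldl (fun m k => max m (pvL arr k)) 0)
            ((List.range arr.length).foldl (fun m k => max m (pvR arr k)) 0) := by
  unfold maximum_height_bst_alt
  dsimp only
  rw [pv_fwd arr 0 [] [] List.Pairwise.nil (List.Perm.refl [])]
  rw [pv_bwd arr.reverse _ [] [] List.Pairwise.nil (List.Perm.refl [])]
  rw [pv_rcounts_reverse, pv_foldl_max_reverse]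
  have hlc : lcountsAux [] arr = (List.range arr.length).map (fun k => pvL arr k) := by
    rw [lcountsAux_eq]
    apply List.map_congr_left
    intro k _
    simp [pvL]
  rw [hlc]
  have h0 : (0 : Int) ≤ ((List.range arr.length).map (fun k => pvL arr k)).foldl max 0 :=
    (PySem.List.le_foldl_max _ _).1
  conv_lhs =>
    rw [show ((List.range arr.length).map (fun k => pvL arr k)).foldl max 0
        = max (((List.range arr.length).map (fun k => pvL arr k)).foldl max 0) 0
      from (max_eq_left h0).symm]
  rw [pv_foldl_max_max]
  rw [List.foldl_map, List.foldl_map]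

-- ===== VERDICT (by name: the statement is the Claim_ definition above) =====
theorem maximum_height_bst_spec : Claim_equal_maximum_height_bst := by
  intro arr _
  unfold Spec_maximum_height_bst
  rw [pvA_eq, pvB_eq]
  rw [← pv_foldl_max_pair (List.range arr.length) (pvL arr) (pvR arr) 0 0, max_self]
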